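-- pv_equiv track=rewrite | github.com/julia326/advent-of-code | 2020/day12.py | update_waypoint_pos
-- ===== SOURCE A (Python) =====
-- def update_waypoint_pos(ship_i, ship_j, waypoint_i, waypoint_j, direction, amount):
--     # MATH
--     offset_i, offset_j = waypoint_i - ship_i, waypoint_j - ship_j
--     # figure out how many R90 rotations we need
--     num_turns = int(amount/90)
--     num_r90_turns = (num_turns if direction == 'R' else 4 - num_turns)
--     for i in range(num_r90_turns):
--         waypoint_i, waypoint_j = ship_i + offset_j, ship_j - offset_i
--         offset_i, offset_j = waypoint_i - ship_i, waypoint_j - ship_j  # recompute offsets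
--     return waypoint_i, waypoint_j
-- ===== SOURCE B (Python) =====
-- def update_waypoint_pos(ship_i, ship_j, waypoint_i, waypoint_j, direction, amount):
--     offset_i, offset_j = waypoint_i - ship_i, waypoint_j - ship_j
--     num_turns = int(amount / 90)
--     num_r90_turns = num_turns if direction == 'R' else 4 - num_turns
--     if num_r90_turns <= 0:
--         return waypoint_i, waypoint_j
--     k = num_r90_turns % 4
--     if k == 0:
--         ri, rj = offset_i, offset_j
--     elif k == 1:
--         ri, rj = offset_j, -offset_i
--     elif k == 2:
--         ri, rj = -offset_i, -offset_j
--     else: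
--         ri, rj = -offset_j, offset_i
--     return ship_i + ri, ship_j + rj
-- ===== Notes on version B (the rewrite author's own statement) =====
-- stated objective: faster
-- what changed: Replaces the loop that rotates the waypoint 90 degrees per turn (up to ~24 million iterations for large amounts) by a closed-form case split on the number of turns mod 4, with non-positive turn counts as the identity.
import Mathlib
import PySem

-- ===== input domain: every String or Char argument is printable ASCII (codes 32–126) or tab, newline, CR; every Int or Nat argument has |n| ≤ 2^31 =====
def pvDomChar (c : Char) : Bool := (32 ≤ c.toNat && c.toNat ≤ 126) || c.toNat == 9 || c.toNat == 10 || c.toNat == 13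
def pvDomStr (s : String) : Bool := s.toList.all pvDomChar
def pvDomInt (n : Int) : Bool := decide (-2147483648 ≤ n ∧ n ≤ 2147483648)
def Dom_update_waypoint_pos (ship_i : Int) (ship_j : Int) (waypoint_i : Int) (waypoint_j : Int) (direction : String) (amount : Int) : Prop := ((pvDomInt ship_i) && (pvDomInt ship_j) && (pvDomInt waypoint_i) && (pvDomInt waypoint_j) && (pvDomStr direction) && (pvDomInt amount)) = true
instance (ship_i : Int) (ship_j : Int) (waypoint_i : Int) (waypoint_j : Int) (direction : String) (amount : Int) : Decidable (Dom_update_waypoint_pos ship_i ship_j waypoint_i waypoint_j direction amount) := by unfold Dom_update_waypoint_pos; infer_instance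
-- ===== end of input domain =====

-- B replaces A's per-90° rotation loop by a closed-form case split on (turns % 4).

-- ===== PORT A =====
-- A's for-loop over range(num_r90_turns): structural recursion on the (clamped) trip count,
-- state = (waypoint_i, waypoint_j, offset_i, offset_j), body transliterated step for step.
def awLoop (ship_i ship_j : Int) : Nat → Int × Int × Int × Int → Int × Int × Int × Int
  | 0, st => st
  | m + 1, (_, _, offset_i, offset_j) =>
      let waypoint_i := ship_i + offset_j
      let waypoint_j := ship_j - offset_i
      awLoop ship_i ship_j m (waypoint_i, waypoint_j, waypoint_i - ship_i, waypoint_j - ship_j)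

def update_waypoint_pos (ship_i : Int) (ship_j : Int) (waypoint_i : Int) (waypoint_j : Int) (direction : String) (amount : Int) : Int × Int :=
  let offset_i := waypoint_i - ship_i
  let offset_j := waypoint_j - ship_j
  -- int(amount/90): exact on |amount| ≤ 2^31 (float error < distance to the next integer), = truncation toward zero
  let num_turns := Int.tdiv amount 90
  let num_r90_turns := if direction = "R" then num_turns else 4 - num_turns
  let st := awLoop ship_i ship_j num_r90_turns.toNat (waypoint_i, waypoint_j, offset_i, offset_j)
  (st.1, st.2.1)

-- ===== PORT B =====
def update_waypoint_pos_alt (ship_i : Int) (ship_j : Int) (waypoint_i : Int) (waypoint_j : Int) (direction : String) (amount : Int) : Int × Int :=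
  let offset_i := waypoint_i - ship_i
  let offset_j := waypoint_j - ship_j
  -- int(amount/90): exact on |amount| ≤ 2^31, = truncation toward zero
  let num_turns := Int.tdiv amount 90
  let num_r90_turns := if direction = "R" then num_turns else 4 - num_turns
  if num_r90_turns ≤ 0 then (waypoint_i, waypoint_j)
  else
    let k := PySem.Int.mod num_r90_turns 4
    let r := if k = 0 then (offset_i, offset_j)
             else if k = 1 then (offset_j, -offset_i)
             else if k = 2 then (-offset_i, -offset_j)
             else (-offset_j, offset_i)
    (ship_i + r.1, ship_j + r.2)

-- ===== PRECONDITION & SPEC =====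
def Spec_update_waypoint_pos (ship_i : Int) (ship_j : Int) (waypoint_i : Int) (waypoint_j : Int) (direction : String) (amount : Int) (out : Int × Int) : Prop := out = update_waypoint_pos_alt ship_i ship_j waypoint_i waypoint_j direction amount
instance (ship_i : Int) (ship_j : Int) (waypoint_i : Int) (waypoint_j : Int) (direction : String) (amount : Int) (out : Int × Int) : Decidable (Spec_update_waypoint_pos ship_i ship_j waypoint_i waypoint_j direction amount out) := by unfold Spec_update_waypoint_pos; infer_instance

-- ===== CLAIM (what is proved, stated in full; the proofs are below) =====
def Claim_equal_update_waypoint_pos : Prop := ∀ (ship_i : Int) (ship_j : Int) (waypoint_i : Int) (waypoint_j : Int) (direction : String) (amount : Int), Dom_update_waypoint_pos ship_i ship_j waypoint_i waypoint_j direction amount → Spec_update_waypoint_pos ship_i ship_j waypoint_i waypoint_j direction amount (update_waypoint_pos ship_i ship_j waypoint_i waypoint_j direction amount)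

-- ===== LEMMAS AND PROOFS =====

-- iterated R90 rotation of the offset
def rotPow : Nat → Int × Int → Int × Int
  | 0, p => p
  | m + 1, (a, b) => rotPow m (b, -a)

theorem awLoop_eq (si sj a b : Int) (m : Nat) :
    awLoop si sj m (si + a, sj + b, a, b) =
      (si + (rotPow m (a, b)).1, sj + (rotPow m (a, b)).2, (rotPow m (a, b)).1, (rotPow m (a, b)).2) := by
  induction m generalizing a b with
  | zero => simp [awLoop, rotPow]
  | succ m ih =>
      have h := ih b (-a)
      simp only [awLoop, rotPow]
      simpa [sub_eq_add_neg, add_sub_cancel_left] using h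

theorem rotPow_add_four (m : Nat) (p : Int × Int) : rotPow (m + 4) p = rotPow m p := by
  obtain ⟨a, b⟩ := p
  show rotPow (m + 1 + 1 + 1 + 1) (a, b) = rotPow m (a, b)
  simp [rotPow]

theorem rotPow_mod (m : Nat) (p : Int × Int) : rotPow m p = rotPow (m % 4) p := by
  induction m using Nat.strong_induction_on with
  | _ m ih =>
    by_cases h : m < 4
    · rw [Nat.mod_eq_of_lt h]
    · have h4 : m = (m - 4) + 4 := by omega
      rw [h4, rotPow_add_four, ih (m - 4) (by omega)]
      congr 1
      omega

-- ===== VERDICT (by name: the statement is the Claim_ definition above) =====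
theorem update_waypoint_pos_spec : Claim_equal_update_waypoint_pos := by
  intro si sj wi wj direction amount _
  unfold Spec_update_waypoint_pos update_waypoint_pos update_waypoint_pos_alt
  dsimp only
  generalize (if direction = "R" then Int.tdiv amount 90 else 4 - Int.tdiv amount 90) = n
  by_cases h0 : n ≤ 0
  · rw [if_pos h0, Int.toNat_of_nonpos h0]
    rfl
  · rw [if_neg h0]
    have e : (wi, wj, wi - si, wj - sj) = (si + (wi - si), sj + (wj - sj), wi - si, wj - sj) := by
      simp
    rw [e, awLoop_eq si sj (wi - si) (wj - sj) n.toNat, rotPow_mod]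
    have hk : PySem.Int.mod n 4 = ((n.toNat % 4 : Nat) : Int) := by
      rw [PySem.Int.mod_eq_emod_of_pos (by omega)]
      omega
    rw [hk]
    have h4 : n.toNat % 4 < 4 := Nat.mod_lt _ (by omega)
    interval_cases h : n.toNat % 4 <;> simp [h, rotPow]
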